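-- pv_equiv track=rewrite | github.com/azhar1038/IoT_Assignment_3 | function/1.py | fibonacci_range
-- ===== SOURCE A (Python) =====
-- def is_prime(n):
--     if n<2: return False
--     if n<4: return True
--     if n%2 == 0 or n%3 == 0: return False
--     i = 5
--     while i*i <= n:
--         if n%i == 0 or n%(i+2) == 0:
--              return False
--         i += 6
--     return True
--
-- def fibonacci_range(start=10, end=50):
--     series = []
--     a=0
--     b=1
--     while (c:=a+b) <= end:
--         a = b
--         b = c
--         if c >= start and is_prime(c):
--             series.append(c)
--     return series
-- ===== SOURCE B (Python) =====
-- def fibonacci_range(start=10, end=50):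
--     # integer square root of end (0 when end < 1)
--     limit = 0
--     while (limit + 1) * (limit + 1) <= end:
--         limit += 1
--     # sieve: strike out every product d*k (k >= 2) up to limit
--     composite = set()
--     d = 2
--     while d <= limit:
--         m = d + d
--         while m <= limit:
--             composite.add(m)
--             m += d
--         d += 1
--     primes = [p for p in range(2, limit + 1) if p not in composite]
--     series = []
--     a, b = 0, 1
--     while (c := a + b) <= end:
--         a, b = b, c
--         if start <= c and 2 <= c and all(c % p != 0 for p in primes if p * p <= c):
--             series.append(c)
--     return series
-- ===== Notes on version B (the rewrite author's own statement) =====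
-- stated objective: alternative
-- what changed: B precomputes a sieve of Eratosthenes over 2..isqrt(end) to get a prime table and then filters the Fibonacci numbers by dividing only by those table primes up to sqrt(c), instead of A's fused loop calling a 6k+-1 wheel trial-division primality test per Fibonacci number.
import Mathlib
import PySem

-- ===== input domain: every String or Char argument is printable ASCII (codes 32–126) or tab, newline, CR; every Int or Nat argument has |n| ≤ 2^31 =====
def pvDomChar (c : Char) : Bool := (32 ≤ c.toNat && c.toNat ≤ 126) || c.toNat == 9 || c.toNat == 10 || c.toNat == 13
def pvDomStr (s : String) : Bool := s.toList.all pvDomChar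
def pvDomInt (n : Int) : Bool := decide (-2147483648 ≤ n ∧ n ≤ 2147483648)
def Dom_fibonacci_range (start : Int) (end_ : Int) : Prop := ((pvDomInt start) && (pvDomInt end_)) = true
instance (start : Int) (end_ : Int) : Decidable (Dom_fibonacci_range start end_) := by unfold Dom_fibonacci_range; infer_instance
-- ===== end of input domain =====

-- B precomputes a sieve of Eratosthenes over 2..isqrt(end) and filters the Fibonacci
-- numbers by dividing only by those table primes, instead of A's per-number 6k±1 wheel
-- trial division (objective: alternative; not faster).
-- The while loops are ported as structural recursion on a fuel that provably exceeds the
-- number of iterations (each loop's exit value equals its base value, so ample fuel is exact).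

-- ===== PORT A =====
-- the 'while i*i <= n' loop of is_prime, started at i = 5 (i grows by 6 each step,
-- so n.toNat fuel more than covers the iterations)
def pvWheelLoop (n i : Int) : Nat → Bool
  | 0 => true
  | fuel + 1 =>
    if i * i ≤ n then
      if PySem.Int.mod n i = 0 ∨ PySem.Int.mod n (i + 2) = 0 then false
      else pvWheelLoop n (i + 6) fuel
    else true

def pvIsPrime (n : Int) : Bool :=
  if n < 2 then false
  else if n < 4 then true
  else if PySem.Int.mod n 2 = 0 ∨ PySem.Int.mod n 3 = 0 then false
  else pvWheelLoop n 5 n.toNat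

-- A's main while loop; c = a + b strictly increases each iteration, so (end_+1).toNat
-- fuel more than covers the iterations
def pvFibALoop (start end_ a b : Int) : Nat → List Int
  | 0 => []
  | fuel + 1 =>
    if a + b ≤ end_ then
      (if start ≤ a + b ∧ pvIsPrime (a + b) = true then [a + b] else [])
        ++ pvFibALoop start end_ b (a + b) fuel
    else []

def fibonacci_range (start : Int) (end_ : Int) : List Int :=
  pvFibALoop start end_ 0 1 (end_ + 1).toNat

-- ===== PORT B =====
-- 'while (limit+1)*(limit+1) <= end: limit += 1' (limit never exceeds end, so
-- end.toNat + 1 fuel covers the iterations)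
def pvIsqrtLoop (end_ limit : Int) : Nat → Int
  | 0 => limit
  | fuel + 1 =>
    if (limit + 1) * (limit + 1) ≤ end_ then pvIsqrtLoop end_ (limit + 1) fuel
    else limit

-- the inner 'while m <= limit: composite.add(m); m += d' loop (m grows by d ≥ 2,
-- so limit.toNat + 1 fuel covers the iterations)
def pvMarkLoop (limit d m : Int) (comp : PySem.Set Int) : Nat → PySem.Set Int
  | 0 => comp
  | fuel + 1 =>
    if m ≤ limit then pvMarkLoop limit d (m + d) (PySem.Set.add comp m) fuel
    else comp

-- the outer 'while d <= limit' sieve loop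
def pvSieveLoop (limit d : Int) (comp : PySem.Set Int) : Nat → PySem.Set Int
  | 0 => comp
  | fuel + 1 =>
    if d ≤ limit then
      pvSieveLoop limit (d + 1) (pvMarkLoop limit d (d + d) comp (limit.toNat + 1)) fuel
    else comp

-- 'all(c % p != 0 for p in primes if p * p <= c)'
def pvAllNoDiv (primes : List Int) (c : Int) : Bool :=
  primes.all (fun p => !(decide (p * p ≤ c)) || decide (PySem.Int.mod c p ≠ 0))

-- B's main while loop, same recurrence, testing against the prime table
def pvFibBLoop (start end_ : Int) (primes : List Int) (a b : Int) : Nat → List Int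
  | 0 => []
  | fuel + 1 =>
    if a + b ≤ end_ then
      (if start ≤ a + b ∧ 2 ≤ a + b ∧ pvAllNoDiv primes (a + b) = true then [a + b] else [])
        ++ pvFibBLoop start end_ primes b (a + b) fuel
    else []

def pvPrimesUpTo (limit : Int) : List Int :=
  (PySem.List.pyRange 2 (limit + 1) 1).filter
    (fun p => !(PySem.Set.contains (pvSieveLoop limit 2 PySem.Set.empty (limit.toNat + 1)) p))

def fibonacci_range_alt (start : Int) (end_ : Int) : List Int :=
  pvFibBLoop start end_ (pvPrimesUpTo (pvIsqrtLoop end_ 0 (end_.toNat + 1))) 0 1 (end_ + 1).toNat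

-- ===== PRECONDITION & SPEC =====
def Spec_fibonacci_range (start : Int) (end_ : Int) (out : List Int) : Prop := out = fibonacci_range_alt start end_
instance (start : Int) (end_ : Int) (out : List Int) : Decidable (Spec_fibonacci_range start end_ out) := by unfold Spec_fibonacci_range; infer_instance

-- ===== CLAIM (what is proved, stated in full; the proofs are below) =====
def Claim_equal_fibonacci_range : Prop := ∀ (start : Int) (end_ : Int), Dom_fibonacci_range start end_ → Spec_fibonacci_range start end_ (fibonacci_range start end_)

-- ===== LEMMAS AND PROOFS =====

-- "n has no divisor e with 2 ≤ e and e² ≤ n" — the common primality core of both tests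
def pvND (n : Int) : Prop := ∀ e : Int, 2 ≤ e → e * e ≤ n → ¬ e ∣ n

-- e ≤ e * e for 2 ≤ e
theorem pv_le_sq {e : Int} (he : 2 ≤ e) : e ≤ e * e :=
  (le_mul_iff_one_le_right (by omega)).mpr (by omega)

-- wheel loop: under the invariants of is_prime's run, it decides pvND
theorem pvWheelLoop_iff (n : Int) (h2 : ¬ (2 : Int) ∣ n) (h3 : ¬ (3 : Int) ∣ n)
    (fuel : Nat) : ∀ i : Int, 5 ≤ i → i % 6 = 5 → n < i + fuel →
    (∀ e : Int, 2 ≤ e → e < i → e * e ≤ n → ¬ e ∣ n) →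
    (pvWheelLoop n i fuel = true ↔ pvND n) := by
  induction fuel with
  | zero =>
      intro i hi5 hmod hfuel hinv
      simp only [pvWheelLoop, true_iff]
      intro e he hee hd
      have := pv_le_sq he
      exact hinv e he (by omega) hee hd
  | succ fuel ih =>
      intro i hi5 hmod hfuel hinv
      simp only [pvWheelLoop]
      by_cases h : i * i ≤ n
      · rw [if_pos h]
        by_cases hm : PySem.Int.mod n i = 0 ∨ PySem.Int.mod n (i + 2) = 0
        · rw [if_pos hm]
          simp only [Bool.false_eq_true, false_iff]
          intro H
          rcases hm with hmi | hmi2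
          · exact H i (by omega) h ((PySem.Int.mod_eq_zero_iff_dvd n i).mp hmi)
          · have hdvd : (i + 2) ∣ n := (PySem.Int.mod_eq_zero_iff_dvd n (i + 2)).mp hmi2
            by_cases hbig : (i + 2) * (i + 2) ≤ n
            · exact H (i + 2) (by omega) hbig hdvd
            · push Not at hbig
              obtain ⟨q, hq'⟩ := hdvd
              have h0 : 0 < q := by nlinarith
              have h1 : q ≠ 1 := by
                intro h1; rw [h1, mul_one] at hq'; nlinarith
              have hq2 : 2 ≤ q := by omega
              have hqlt : q < i + 2 := by nlinarith
              have hqq : q * q ≤ n := by nlinarith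
              exact H q hq2 hqq ⟨i + 2, by rw [hq']; ring⟩
        · rw [if_neg hm]
          push Not at hm
          have hni : ¬ i ∣ n := fun hd => hm.1 ((PySem.Int.mod_eq_zero_iff_dvd n i).mpr hd)
          have hni2 : ¬ (i + 2) ∣ n := fun hd => hm.2 ((PySem.Int.mod_eq_zero_iff_dvd n (i + 2)).mpr hd)
          refine ih (i + 6) (by omega) (by omega) (by omega) ?_
          intro e he helt hee hd
          by_cases hlt : e < i
          · exact hinv e he hlt hee hd
          · have hcases : e = i ∨ e = i + 1 ∨ e = i + 2 ∨ e = i + 3 ∨ e = i + 4 ∨ e = i + 5 := by omega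
            rcases hcases with rfl | rfl | rfl | rfl | rfl | rfl
            · exact hni hd
            · exact h2 (dvd_trans (by omega : (2 : Int) ∣ (i + 1)) hd)
            · exact hni2 hd
            · exact h2 (dvd_trans (by omega : (2 : Int) ∣ (i + 3)) hd)
            · exact h3 (dvd_trans (by omega : (3 : Int) ∣ (i + 4)) hd)
            · exact h2 (dvd_trans (by omega : (2 : Int) ∣ (i + 5)) hd)
      · rw [if_neg h]
        simp only [true_iff]
        intro e he hee hd
        have helt : e < i := by
          by_contra hge
          push Not at hge
          nlinarith
        exact hinv e he helt hee hd

-- A's is_prime decides "2 ≤ n and no small divisor"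
theorem pvIsPrime_iff (n : Int) : pvIsPrime n = true ↔ 2 ≤ n ∧ pvND n := by
  unfold pvIsPrime
  by_cases h2n : n < 2
  · simp only [if_pos h2n, Bool.false_eq_true, false_iff]
    rintro ⟨h, -⟩
    omega
  · rw [if_neg h2n]
    by_cases h4 : n < 4
    · rw [if_pos h4]
      simp only [true_iff]
      refine ⟨by omega, ?_⟩
      intro e he hee hd
      nlinarith
    · rw [if_neg h4]
      by_cases h23 : PySem.Int.mod n 2 = 0 ∨ PySem.Int.mod n 3 = 0
      · rw [if_pos h23]
        simp only [Bool.false_eq_true, false_iff]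
        intro ⟨_, H⟩
        rcases h23 with hm2 | hm3
        · exact H 2 le_rfl (by omega) ((PySem.Int.mod_eq_zero_iff_dvd n 2).mp hm2)
        · have hd3 := (PySem.Int.mod_eq_zero_iff_dvd n 3).mp hm3
          by_cases hd2 : (2 : Int) ∣ n
          · exact H 2 le_rfl (by omega) hd2
          · obtain ⟨t, rfl⟩ := hd3
            have ht : 3 ≤ t := by
              rcases Int.even_or_odd t with ⟨u, hu⟩ | ⟨u, hu⟩
              · exact absurd ⟨3 * u, by omega⟩ hd2
              · omega
            exact H 3 (by omega) (by omega) ⟨t, rfl⟩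
      · rw [if_neg h23]
        push Not at h23
        have hn2 : ¬ (2 : Int) ∣ n := fun hd =>
          h23.1 ((PySem.Int.mod_eq_zero_iff_dvd n 2).mpr hd)
        have hn3 : ¬ (3 : Int) ∣ n := fun hd =>
          h23.2 ((PySem.Int.mod_eq_zero_iff_dvd n 3).mpr hd)
        have hinv : ∀ e : Int, 2 ≤ e → e < 5 → e * e ≤ n → ¬ e ∣ n := by
          intro e he helt hee hd
          have hcases : e = 2 ∨ e = 3 ∨ e = 4 := by omega
          rcases hcases with rfl | rfl | rfl
          · exact hn2 hd
          · exact hn3 hd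
          · exact hn2 (dvd_trans (by omega : (2 : Int) ∣ 4) hd)
        rw [pvWheelLoop_iff n hn2 hn3 n.toNat 5 (by omega) (by omega) (by omega) hinv]
        exact (and_iff_right (by omega)).symm

-- the isqrt loop's result R satisfies limit ≤ R and (R+1)² > end
theorem pvIsqrtLoop_spec (end_ : Int) (fuel : Nat) : ∀ limit : Int, 0 ≤ limit →
    end_ < limit + fuel →
    limit ≤ pvIsqrtLoop end_ limit fuel ∧
      ¬ ((pvIsqrtLoop end_ limit fuel + 1) * (pvIsqrtLoop end_ limit fuel + 1) ≤ end_) := by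
  induction fuel with
  | zero =>
      intro limit h0 hfuel
      have hfuel' : end_ < limit := by omega
      simp only [pvIsqrtLoop]
      refine ⟨le_rfl, ?_⟩
      intro hc
      nlinarith [mul_nonneg (show (0:Int) ≤ limit + 1 by omega) (show (0:Int) ≤ limit by omega)]
  | succ fuel ih =>
      intro limit h0 hfuel
      simp only [pvIsqrtLoop]
      by_cases h : (limit + 1) * (limit + 1) ≤ end_
      · rw [if_pos h]
        have hsq1 : limit + 1 ≤ (limit + 1) * (limit + 1) := by
          nlinarith [mul_nonneg (show (0:Int) ≤ limit + 1 by omega) (show (0:Int) ≤ limit by omega)]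
        have hle : limit + 1 ≤ end_ := le_trans hsq1 h
        have := ih (limit + 1) (by omega) (by omega)
        exact ⟨by omega, this.2⟩
      · rw [if_neg h]
        exact ⟨le_rfl, h⟩

-- the inner mark loop adds exactly m, m+d, m+2d, … up to limit
theorem pvMarkLoop_mem (limit d : Int) (hd : 1 ≤ d) (x : Int) (fuel : Nat) :
    ∀ m : Int, ∀ comp : PySem.Set Int, limit < m + fuel →
    (x ∈ pvMarkLoop limit d m comp fuel ↔
      x ∈ comp ∨ ∃ k : Int, 0 ≤ k ∧ x = m + d * k ∧ x ≤ limit) := by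
  induction fuel with
  | zero =>
      intro m comp hfuel
      simp only [pvMarkLoop]
      constructor
      · exact Or.inl
      · rintro (h | ⟨k, hk, rfl, hle⟩)
        · exact h
        · have hdk : 0 ≤ d * k := mul_nonneg (by omega) hk
          omega
  | succ fuel ih =>
      intro m comp hfuel
      simp only [pvMarkLoop]
      by_cases h : m ≤ limit
      · rw [if_pos h, ih (m + d) _ (by omega)]
        rw [PySem.Set.mem_add]
        constructor
        · rintro ((hc | rfl) | ⟨k, hk, rfl, hle⟩)
          · exact Or.inl hc
          · exact Or.inr ⟨0, le_rfl, by ring, h⟩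
          · exact Or.inr ⟨k + 1, by omega, by ring, hle⟩
        · rintro (hc | ⟨k, hk, rfl, hle⟩)
          · exact Or.inl (Or.inl hc)
          · rcases eq_or_lt_of_le hk with rfl | hk1
            · exact Or.inl (Or.inr (by ring))
            · exact Or.inr ⟨k - 1, by omega, by ring, hle⟩
      · rw [if_neg h]
        constructor
        · exact Or.inl
        · rintro (hc | ⟨k, hk, rfl, hle⟩)
          · exact hc
          · have hdk : 0 ≤ d * k := mul_nonneg (by omega) hk
            omega

-- the outer sieve loop's result contains exactly the products d'·k (d ≤ d', 2 ≤ k) up to limit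
theorem pvSieveLoop_mem (limit : Int) (x : Int) (fuel : Nat) :
    ∀ d : Int, 2 ≤ d → limit < d + fuel → ∀ comp : PySem.Set Int,
    (x ∈ pvSieveLoop limit d comp fuel ↔
      x ∈ comp ∨ ∃ d' k : Int, d ≤ d' ∧ 2 ≤ k ∧ x = d' * k ∧ x ≤ limit) := by
  induction fuel with
  | zero =>
      intro d hd2 hfuel comp
      simp only [pvSieveLoop]
      constructor
      · exact Or.inl
      · rintro (h | ⟨d', k, hdd, hk, rfl, hle⟩)
        · exact h
        · have h2d : d' * 2 ≤ d' * k := by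
            exact mul_le_mul_of_nonneg_left hk (by omega)
          omega
  | succ fuel ih =>
      intro d hd2 hfuel comp
      simp only [pvSieveLoop]
      by_cases h : d ≤ limit
      · rw [if_pos h, ih (d + 1) (by omega) (by omega)]
        rw [pvMarkLoop_mem limit d (by omega) x (limit.toNat + 1) (d + d) comp (by omega)]
        constructor
        · rintro ((hc | ⟨k, hk, rfl, hle⟩) | ⟨d', k, hdd, hk, rfl, hle⟩)
          · exact Or.inl hc
          · exact Or.inr ⟨d, k + 2, le_rfl, by omega, by ring, hle⟩
          · exact Or.inr ⟨d', k, by omega, hk, rfl, hle⟩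
        · rintro (hc | ⟨d', k, hdd, hk, rfl, hle⟩)
          · exact Or.inl (Or.inl hc)
          · rcases eq_or_lt_of_le hdd with rfl | hlt
            · exact Or.inl (Or.inr ⟨k - 2, by omega, by ring, hle⟩)
            · exact Or.inr ⟨d', k, by omega, hk, rfl, hle⟩
      · rw [if_neg h]
        constructor
        · exact Or.inl
        · rintro (hc | ⟨d', k, hdd, hk, rfl, hle⟩)
          · exact hc
          · have h2d : d' * 2 ≤ d' * k := by
              exact mul_le_mul_of_nonneg_left hk (by omega)
            omega

-- membership in B's prime table
theorem pvPrimesUpTo_mem (limit : Int) (p : Int) :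
    p ∈ pvPrimesUpTo limit ↔
      2 ≤ p ∧ p ≤ limit ∧ ¬ ∃ d' k : Int, 2 ≤ d' ∧ 2 ≤ k ∧ p = d' * k ∧ p ≤ limit := by
  unfold pvPrimesUpTo
  rw [List.mem_filter, PySem.List.mem_pyRange_one]
  have hmem := pvSieveLoop_mem limit p (limit.toNat + 1) 2 le_rfl (by omega)
    ([] : PySem.Set Int)
  constructor
  · rintro ⟨⟨h2, hlt⟩, hf⟩
    refine ⟨h2, by omega, fun hex => ?_⟩
    have hin : p ∈ pvSieveLoop limit 2 ([] : PySem.Set Int) (limit.toNat + 1) :=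
      hmem.mpr (Or.inr hex)
    simp at hf
    exact hf hin
  · rintro ⟨h2, hle, hnc⟩
    refine ⟨⟨h2, by omega⟩, ?_⟩
    have hout : p ∉ pvSieveLoop limit 2 ([] : PySem.Set Int) (limit.toNat + 1) := by
      rw [hmem]
      rintro (hc | hex)
      · simp at hc
      · exact hnc hex
    simp [hout]

-- B's table test agrees with pvND for 2 ≤ c ≤ end
theorem pvAllNoDiv_iff (end_ c : Int) (h2 : 2 ≤ c) (hce : c ≤ end_) :
    pvAllNoDiv (pvPrimesUpTo (pvIsqrtLoop end_ 0 (end_.toNat + 1))) c = true ↔ pvND c := by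
  have hsq := pvIsqrtLoop_spec end_ (end_.toNat + 1) 0 le_rfl (by omega)
  set L := pvIsqrtLoop end_ 0 (end_.toNat + 1) with hL
  have hL0 : 0 ≤ L := hsq.1
  have hLbig : ∀ e : Int, 0 ≤ e → e * e ≤ end_ → e ≤ L := by
    intro e he hee
    by_contra hgt
    push Not at hgt
    have : (L + 1) * (L + 1) ≤ e * e := by nlinarith
    exact hsq.2 (by omega)
  unfold pvAllNoDiv
  rw [List.all_eq_true]
  constructor
  · -- table test → no small divisor at all
    intro H e he hee hd
    -- pass to the least prime factor of c
    have hc2 : 2 ≤ c.toNat := by omega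
    have hq : Nat.Prime (c.toNat.minFac) := Nat.minFac_prime (by omega)
    set q := c.toNat.minFac with hqdef
    have hqd : (q : Int) ∣ c := by
      have := Nat.minFac_dvd c.toNat
      have : (q : Int) ∣ (c.toNat : Int) := Int.natCast_dvd_natCast.mpr this
      rwa [Int.toNat_of_nonneg (by omega)] at this
    have hqe : q ≤ e.toNat := by
      apply Nat.minFac_le_of_dvd (by omega)
      have : e.toNat ∣ c.toNat := by
        rw [← Int.natCast_dvd_natCast, Int.toNat_of_nonneg (by omega),
          Int.toNat_of_nonneg (by omega)]
        exact hd
      exact this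
    have hq2 : 2 ≤ (q : Int) := by exact_mod_cast hq.two_le
    have hqq : (q : Int) * q ≤ c := by
      have h1 : (q : Int) ≤ e := by
        have := Int.toNat_of_nonneg (show (0:Int) ≤ e by omega)
        omega
      nlinarith
    have hqL : (q : Int) ≤ L := hLbig q (by positivity) (by omega)
    have hqmem : (q : Int) ∈ pvPrimesUpTo L := by
      rw [pvPrimesUpTo_mem]
      refine ⟨hq2, hqL, ?_⟩
      rintro ⟨d', k, hd', hk, hqdk, -⟩
      have hdq : d'.toNat ∣ q := by
        have : (d'.toNat : Int) ∣ (q : Int) := by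
          rw [Int.toNat_of_nonneg (by omega)]; exact ⟨k, hqdk⟩
        exact_mod_cast this
      have hd2 : d'.toNat ≠ 1 := by omega
      have := (Nat.Prime.eq_one_or_self_of_dvd hq _ hdq).resolve_left hd2
      -- then k = 1, contradicting 2 ≤ k
      have hdq' : (d' : Int) = q := by omega
      rw [hdq'] at hqdk
      have : (q : Int) * 1 = (q : Int) * k := by omega
      have hk1 : (1 : Int) = k := by
        have hq0 : (q : Int) ≠ 0 := by omega
        exact mul_left_cancel₀ hq0 this
      omega
    have := H (q : Int) hqmem
    simp only [Bool.or_eq_true, Bool.not_eq_eq_eq_not, Bool.not_true, decide_eq_false_iff_not,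
      decide_eq_true_eq] at this
    rcases this with hno | hmod
    · exact hno hqq
    · exact hmod ((PySem.Int.mod_eq_zero_iff_dvd c (q : Int)).mpr hqd)
  · -- pvND → table test
    intro H p hp
    rw [pvPrimesUpTo_mem] at hp
    simp only [Bool.or_eq_true, Bool.not_eq_eq_eq_not, Bool.not_true, decide_eq_false_iff_not,
      decide_eq_true_eq]
    by_cases hpp : p * p ≤ c
    · right
      rw [Ne, PySem.Int.mod_eq_zero_iff_dvd]
      exact H p hp.1 hpp
    · exact Or.inl hpp

-- the two main loops produce the same list
theorem pvLoop_eq (start end_ : Int) (fuel : Nat) : ∀ a b : Int,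
    pvFibALoop start end_ a b fuel =
      pvFibBLoop start end_ (pvPrimesUpTo (pvIsqrtLoop end_ 0 (end_.toNat + 1))) a b fuel := by
  induction fuel with
  | zero => intro a b; rfl
  | succ fuel ih =>
      intro a b
      simp only [pvFibALoop, pvFibBLoop]
      by_cases h : a + b ≤ end_
      · rw [if_pos h, if_pos h, ih]
        congr 1
        refine if_congr ?_ rfl rfl
        constructor
        · rintro ⟨hs, hp⟩
          obtain ⟨h2', hnd⟩ := (pvIsPrime_iff _).mp hp
          exact ⟨hs, h2', (pvAllNoDiv_iff end_ _ h2' h).mpr hnd⟩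
        · rintro ⟨hs, h2', hall⟩
          exact ⟨hs, (pvIsPrime_iff _).mpr ⟨h2', (pvAllNoDiv_iff end_ _ h2' h).mp hall⟩⟩
      · rw [if_neg h, if_neg h]

-- ===== VERDICT (by name: the statement is the Claim_ definition above) =====
theorem fibonacci_range_spec : Claim_equal_fibonacci_range := by
  intro start end_ _
  unfold Spec_fibonacci_range fibonacci_range fibonacci_range_alt
  exact pvLoop_eq start end_ (end_ + 1).toNat 0 1
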